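-- pv_equiv track=rewrite | github.com/Abjad/abjad | trunk/abjad/tools/seqtools/truncate_sequence_to_sum.py | truncate_sequence_to_sum
-- ===== SOURCE A (Python) =====
-- def truncate_sequence_to_sum(l, total):
--    '''Truncate list *l* such that ``sum(l) == total``.
--
--    ::
--
--       abjad> for n in range(10):
--       ...     print n, seqtools.truncate_sequence_to_sum([2, 2, 2], n)
--       ...
--       0 [ ]
--       1 [1]
--       2 [2]
--       3 [2, 1]
--       4 [2, 2]
--       5 [2, 2, 1]
--       6 [2, 2, 2]
--       7 [2, 2, 2]
--       8 [2, 2, 2]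
--       9 [2, 2, 2]
--
--    ::
--
--       abjad> l = [-1, 2, -3, 4, -5, 6, -7, 8, -9, 10]
--       abjad> for n in range(10):
--       ...     print n, seqtools.truncate_sequence_to_sum(l, n)
--       ...
--       0 [ ]
--       1 [-1, 2]
--       2 [-1, 2, -3, 4]
--       3 [-1, 2, -3, 4, -5, 6]
--       4 [-1, 2, -3, 4, -5, 6, -7, 8]
--       5 [-1, 2, -3, 4, -5, 6, -7, 8, -9, 10]
--       6 [-1, 2, -3, 4, -5, 6, -7, 8, -9, 10]
--       7 [-1, 2, -3, 4, -5, 6, -7, 8, -9, 10]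
--       8 [-1, 2, -3, 4, -5, 6, -7, 8, -9, 10]
--       9 [-1, 2, -3, 4, -5, 6, -7, 8, -9, 10]
--
--    Return empty list when ``total == 0``::
--
--       abjad> seqtools.truncate_sequence_to_sum([1, 2, 3, 4, 5], 0)
--       [ ]
--
--    Raise :exc:`TypeError` when *l* is not a list::
--
--       abjad> seqtools.truncate_sequence_to_sum('foo', 4)
--       TypeError
--
--    Raise :exc:`ValueError` on negative *total*::
--
--       abjad> seqtools.truncate_sequence_to_sum([2, 2, 2], -4)
--       ValueError
--
--    .. versionchanged:: 1.1.2
--       renamed ``seqtools.truncate_to_sum( )`` to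
--       ``seqtools.truncate_sequence_to_sum( )``.
--    '''
--
--    if not isinstance(l, list):
--       raise TypeError
--
--    if total < 0:
--       raise ValueError
--
--    #assert 0 <= total
--    result = [ ]
--
--    if total == 0:
--       return result
--
--    #kind = type(l)
--    accumulation = 0
--    for e in l:
--       accumulation += e
--       if accumulation < total:
--          result.append(e)
--       else:
--          result.append(total - sum(result))
--          break
--    #return kind(result)
--    return result
-- ===== SOURCE B (Python) =====
-- def truncate_sequence_to_sum(l, total):
--     if not isinstance(l, list):
--         raise TypeError
--     if total < 0:
--         raise ValueError
--     if total == 0: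
--         return []
--     # build the full prefix-sum table first
--     sums = []
--     acc = 0
--     for e in l:
--         acc += e
--         sums.append(acc)
--     # then scan it for the first prefix sum reaching total
--     prev = 0
--     for i, s in enumerate(sums):
--         if s >= total:
--             return l[:i] + [total - prev]
--         prev = s
--     return list(l)
-- ===== Notes on version B (the rewrite author's own statement) =====
-- stated objective: alternative
-- what changed: A accumulates into the result list inside one loop and computes the correction element as total - sum(result); B first builds the full prefix-sum table, then scans it for the first sum reaching total and returns l[:i] plus the correction taken from the table.
import Mathlib
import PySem

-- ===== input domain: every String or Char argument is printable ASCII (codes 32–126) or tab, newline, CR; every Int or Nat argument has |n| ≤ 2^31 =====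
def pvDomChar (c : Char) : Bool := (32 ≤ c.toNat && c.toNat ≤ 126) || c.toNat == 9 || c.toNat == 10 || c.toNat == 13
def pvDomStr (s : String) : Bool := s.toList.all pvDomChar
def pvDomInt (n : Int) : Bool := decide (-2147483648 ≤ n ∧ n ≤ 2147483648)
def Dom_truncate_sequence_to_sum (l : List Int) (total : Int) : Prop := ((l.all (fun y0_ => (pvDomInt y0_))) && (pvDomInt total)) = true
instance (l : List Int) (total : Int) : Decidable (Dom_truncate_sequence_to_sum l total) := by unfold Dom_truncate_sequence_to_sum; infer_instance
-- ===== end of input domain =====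

-- B builds the prefix-sum table first and then scans it, instead of A's single
-- accumulate-and-append loop that re-sums the result for the correction element
-- (objective: alternative decomposition; return values agree on all total ≥ 0).

-- ===== PORT A =====
-- the for-loop of A: state = (accumulation, result); break modelled by returning
def truncA_loop (rest : List Int) (total acc : Int) (result : List Int) : List Int :=
  match rest with
  | [] => result
  | e :: r =>
    let acc' := acc + e
    if acc' < total then truncA_loop r total acc' (result ++ [e])
    else result ++ [total - result.sum]

def truncate_sequence_to_sum (l : List Int) (total : Int) : List Int :=
  if total = 0 then [] else truncA_loop l total 0 []

-- ===== PORT B =====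
-- Source B's first loop: the prefix-sum table of l starting from acc
def truncB_sums (l : List Int) (acc : Int) : List Int :=
  match l with
  | [] => []
  | e :: r => (acc + e) :: truncB_sums r (acc + e)

-- Source B's second loop: scan the table for the first sum ≥ total, carrying prev
def truncB_scan (l : List Int) (total : Int) (sums : List Int) (i : Nat) (prev : Int) : List Int :=
  match sums with
  | [] => l
  | s :: rest =>
    if total ≤ s then l.take i ++ [total - prev]
    else truncB_scan l total rest (i + 1) s

def truncate_sequence_to_sum_alt (l : List Int) (total : Int) : List Int :=
  if total = 0 then [] else truncB_scan l total (truncB_sums l 0) 0 0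

-- ===== PRECONDITION & SPEC =====
-- A raises ValueError when total < 0; Pre_ excludes exactly those inputs.
def Pre_truncate_sequence_to_sum (l : List Int) (total : Int) : Prop := 0 ≤ total
instance (l : List Int) (total : Int) : Decidable (Pre_truncate_sequence_to_sum l total) := by unfold Pre_truncate_sequence_to_sum; infer_instance
def pvWitness_truncate_sequence_to_sum : List Int × Int := ([2, 2, 2], 3)

def Spec_truncate_sequence_to_sum (l : List Int) (total : Int) (out : List Int) : Prop := out = truncate_sequence_to_sum_alt l total
instance (l : List Int) (total : Int) (out : List Int) : Decidable (Spec_truncate_sequence_to_sum l total out) := by unfold Spec_truncate_sequence_to_sum; infer_instance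

-- ===== CLAIM (what is proved, stated in full; the proofs are below) =====
def Claim_equal_truncate_sequence_to_sum : Prop := ∀ (l : List Int) (total : Int), Dom_truncate_sequence_to_sum l total → Pre_truncate_sequence_to_sum l total → Spec_truncate_sequence_to_sum l total (truncate_sequence_to_sum l total)

-- ===== LEMMAS AND PROOFS =====

lemma truncB_key (total : Int) :
    ∀ (rest res : List Int) (l : List Int),
      l = res ++ rest →
      truncA_loop rest total res.sum res =
        truncB_scan l total (truncB_sums rest res.sum) res.length res.sum := by
  intro rest
  induction rest with
  | nil =>
    intro res l hl
    simp [truncA_loop, truncB_sums, truncB_scan, hl]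
  | cons e r ih =>
    intro res l hl
    simp only [truncA_loop, truncB_sums, truncB_scan]
    by_cases h : res.sum + e < total
    · rw [if_pos h, if_neg (by omega)]
      have hsum : (res ++ [e]).sum = res.sum + e := by simp
      have hlen : (res ++ [e]).length = res.length + 1 := by simp
      have := ih (res ++ [e]) l (by simp [hl])
      rw [hsum, hlen] at this
      exact this
    · rw [if_neg h, if_pos (by omega)]
      have : l.take res.length = res := by
        rw [hl]; exact List.take_left
      rw [this]

-- ===== VERDICT (by name: the statement is the Claim_ definition above) =====
theorem truncate_sequence_to_sum_spec : Claim_equal_truncate_sequence_to_sum := by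
  intro l total _ _
  unfold Spec_truncate_sequence_to_sum truncate_sequence_to_sum truncate_sequence_to_sum_alt
  by_cases h : total = 0
  · simp [h]
  · rw [if_neg h, if_neg h]
    have := truncB_key total l [] l (by simp)
    simpa using this
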